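-- pv_equiv track=rewrite | github.com/gitit4321/well_production_management | helpers.py | company_id_accumulator
-- ===== SOURCE A (Python) =====
-- def company_id_accumulator(db_data):
--     ids = {'company_ids': []}
--
--     for d in db_data:
--         for k, v in d.items():
--             if k == 'company_id' and v not in ids['company_ids']:
--                 ids['company_ids'].append(v)
--
--     for lists in ids.values():
--         lists.sort()
--
--     return ids
-- ===== SOURCE B (Python) =====
-- def company_id_accumulator(db_data):
--     # Flatten all company_id values, sort once, then drop adjacent duplicates.
--     vals = sorted(v for d in db_data for k, v in d.items() if k == 'company_id')
--     result = []
--     for v in vals: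
--         if not result or result[-1] != v:
--             result.append(v)
--     return {'company_ids': result}
-- ===== Notes on version B (the rewrite author's own statement) =====
-- stated objective: alternative
-- what changed: A dedups with a membership scan on an unsorted accumulator and sorts at the end; B flattens all company_id values, sorts them once (duplicates included), and removes adjacent duplicates in a single pass over the sorted list.
import Mathlib
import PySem

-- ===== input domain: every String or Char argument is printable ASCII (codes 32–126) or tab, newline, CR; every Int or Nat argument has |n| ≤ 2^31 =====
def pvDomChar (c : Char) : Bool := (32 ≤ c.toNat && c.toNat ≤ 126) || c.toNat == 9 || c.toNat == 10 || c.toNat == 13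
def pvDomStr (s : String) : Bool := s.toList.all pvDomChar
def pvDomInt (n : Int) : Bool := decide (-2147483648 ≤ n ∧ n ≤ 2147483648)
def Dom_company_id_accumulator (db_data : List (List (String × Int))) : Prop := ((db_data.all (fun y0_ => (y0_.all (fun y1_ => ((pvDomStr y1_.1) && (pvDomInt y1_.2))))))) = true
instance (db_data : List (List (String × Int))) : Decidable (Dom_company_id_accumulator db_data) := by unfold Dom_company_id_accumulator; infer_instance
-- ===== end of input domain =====

-- B flattens all company_id values, sorts once, and removes adjacent duplicates in one pass,
-- instead of A's membership-scan dedup followed by a final sort (objective: alternative algorithm).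

-- ===== PORT A =====
-- ids = {'company_ids': []}; nested loops append v when the key matches and v is not yet in the list;
-- finally each value list of the dict (there is exactly the one key 'company_ids') is sorted in place.
def company_id_accumulator (db_data : List (List (String × Int))) : List (String × List Int) :=
  let acc : List Int := db_data.foldl (fun ids d =>
      d.foldl (fun ids kv =>
        if kv.1 == "company_id" && !ids.contains kv.2 then ids ++ [kv.2] else ids) ids) []
  [("company_ids", PySem.List.sorted acc (fun x => x) false)]

-- ===== PORT B =====
-- result[-1] check of Source B: append v unless the result list ends with v
def pyAdjStep (res : List Int) (v : Int) : List Int :=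
  if res.getLast? = some v then res else res ++ [v]

def company_id_accumulator_alt (db_data : List (List (String × Int))) : List (String × List Int) :=
  let vals : List Int := PySem.List.sorted
      (db_data.flatMap (fun d => (d.filter (fun kv => kv.1 == "company_id")).map Prod.snd))
      (fun x => x) false
  [("company_ids", vals.foldl pyAdjStep [])]

-- ===== PRECONDITION & SPEC =====
def Spec_company_id_accumulator (db_data : List (List (String × Int))) (out : List (String × List Int)) : Prop := out = company_id_accumulator_alt db_data
instance (db_data : List (List (String × Int))) (out : List (String × List Int)) : Decidable (Spec_company_id_accumulator db_data out) := by unfold Spec_company_id_accumulator; infer_instance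

-- ===== CLAIM (what is proved, stated in full; the proofs are below) =====
def Claim_equal_company_id_accumulator : Prop := ∀ (db_data : List (List (String × Int))), Dom_company_id_accumulator db_data → Spec_company_id_accumulator db_data (company_id_accumulator db_data)

-- ===== LEMMAS AND PROOFS =====

-- A's dedup step on the flattened value stream
def dstep (ids : List Int) (v : Int) : List Int :=
  if ids.contains v then ids else ids ++ [v]

-- A's inner loop over one dict equals the dedup fold over that dict's company_id values
theorem innerA_eq_dstep (d : List (String × Int)) (ids : List Int) :
    d.foldl (fun ids kv =>
        if kv.1 == "company_id" && !ids.contains kv.2 then ids ++ [kv.2] else ids) ids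
      = ((d.filter (fun kv => kv.1 == "company_id")).map Prod.snd).foldl dstep ids := by
  induction d generalizing ids with
  | nil => rfl
  | cons kv rest ih =>
    rw [List.foldl_cons]
    by_cases hk : kv.1 == "company_id"
    · rw [List.filter_cons, if_pos hk, List.map_cons, List.foldl_cons]
      by_cases hc : ids.contains kv.2
      · have hv : kv.2 ∈ ids := by simpa using hc
        have h1 : (if kv.1 == "company_id" && !ids.contains kv.2 then ids ++ [kv.2] else ids)
            = ids := by simp [hk, hv]
        have h2 : dstep ids kv.2 = ids := by simp [dstep, hv]
        rw [h1, h2, ih]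
      · have hv : kv.2 ∉ ids := by simpa using hc
        have h1 : (if kv.1 == "company_id" && !ids.contains kv.2 then ids ++ [kv.2] else ids)
            = ids ++ [kv.2] := by simp [hk, hv]
        have h2 : dstep ids kv.2 = ids ++ [kv.2] := by simp [dstep, hv]
        rw [h1, h2, ih]
    · have h1 : (if kv.1 == "company_id" && !ids.contains kv.2 then ids ++ [kv.2] else ids) = ids := by
        simp [hk]
      rw [List.filter_cons, if_neg hk, h1, ih]

-- A's double loop equals the dedup fold over the flattened value stream
theorem outerA_eq_dstep (db : List (List (String × Int))) (ids : List Int) :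
    db.foldl (fun ids d =>
        d.foldl (fun ids kv =>
          if kv.1 == "company_id" && !ids.contains kv.2 then ids ++ [kv.2] else ids) ids) ids
      = (db.flatMap (fun d => (d.filter (fun kv => kv.1 == "company_id")).map Prod.snd)).foldl dstep ids := by
  induction db generalizing ids with
  | nil => rfl
  | cons d rest ih =>
    rw [List.foldl_cons, List.flatMap_cons, List.foldl_append, innerA_eq_dstep]
    exact ih _

-- the dedup fold: preserves Nodup, and collects exactly the elements of ids and xs
theorem dstep_fold_spec (xs : List Int) : ∀ (ids : List Int), ids.Nodup →
    (xs.foldl dstep ids).Nodup ∧ ∀ x, (x ∈ xs.foldl dstep ids ↔ x ∈ ids ∨ x ∈ xs) := by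
  induction xs with
  | nil => intro ids h; simpa using h
  | cons v rest ih =>
    intro ids h
    by_cases hc : ids.contains v
    · have hv : v ∈ ids := by simpa using hc
      have hstep : dstep ids v = ids := by simp [dstep, hv]
      simp only [List.foldl_cons, hstep]
      have := ih ids h
      refine ⟨this.1, fun x => ?_⟩
      rw [this.2 x]
      simp only [List.mem_cons]
      constructor
      · rintro (hx | hx) <;> tauto
      · rintro (hx | rfl | hx) <;> tauto
    · have hv : v ∉ ids := by simpa using hc
      have hstep : dstep ids v = ids ++ [v] := by simp [dstep, hv]
      have hnd : (ids ++ [v]).Nodup :=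
        h.append (by simp) (by simpa [List.disjoint_singleton] using hv)
      simp only [List.foldl_cons, hstep]
      have := ih (ids ++ [v]) hnd
      refine ⟨this.1, fun x => ?_⟩
      rw [this.2 x]
      simp only [List.mem_append, List.mem_cons]
      tauto

-- last element of a strictly increasing list bounds all its elements
theorem le_getLast_of_pairwise_lt : ∀ (res : List Int) (m : Int),
    res.Pairwise (· < ·) → res.getLast? = some m → ∀ a ∈ res, a ≤ m := by
  intro res
  induction res with
  | nil => intro m _ h; simp at h
  | cons r rs ih =>
    intro m hp hl a ha
    cases rs with
    | nil =>
      simp at hl ha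
      omega
    | cons s ss =>
      rw [List.getLast?_cons_cons] at hl
      rcases List.mem_cons.mp ha with rfl | ha
      · have hm : m ∈ s :: ss := List.mem_of_getLast? hl
        have := (List.pairwise_cons.mp hp).1 m hm
        omega
      · exact ih m (List.pairwise_cons.mp hp).2 hl a ha

-- the adjacency-dedup fold on a weakly sorted stream: strictly increasing output,
-- collecting exactly the elements of res and xs
theorem adj_fold_spec : ∀ (xs res : List Int), xs.Pairwise (· ≤ ·) → res.Pairwise (· < ·) →
    (∀ m, res.getLast? = some m → ∀ b ∈ xs, m ≤ b) →
    (xs.foldl pyAdjStep res).Pairwise (· < ·) ∧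
      ∀ x, x ∈ xs.foldl pyAdjStep res ↔ x ∈ res ∨ x ∈ xs := by
  intro xs
  induction xs with
  | nil => intro res _ hr _; exact ⟨hr, by simp⟩
  | cons v rest ih =>
    intro res hx hr hlast
    have hx' : rest.Pairwise (· ≤ ·) := (List.pairwise_cons.mp hx).2
    have hvle : ∀ b ∈ rest, v ≤ b := (List.pairwise_cons.mp hx).1
    by_cases hl : res.getLast? = some v
    · have hvin : v ∈ res := List.mem_of_getLast? hl
      have hstep : pyAdjStep res v = res := by simp [pyAdjStep, hl]
      simp only [List.foldl_cons, hstep]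
      have hlast' : ∀ m, res.getLast? = some m → ∀ b ∈ rest, m ≤ b := by
        intro m hm b hb
        rw [hl] at hm; injection hm with hm; subst hm
        exact hvle b hb
      have := ih res hx' hr hlast'
      refine ⟨this.1, fun x => ?_⟩
      rw [this.2 x]
      simp only [List.mem_cons]
      constructor
      · rintro (hx0 | hx0) <;> tauto
      · rintro (hx0 | rfl | hx0) <;> tauto
    · have hstep : pyAdjStep res v = res ++ [v] := by simp [pyAdjStep, hl]
      have hr' : (res ++ [v]).Pairwise (· < ·) := by
        rw [List.pairwise_append]
        refine ⟨hr, by simp, ?_⟩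
        intro a ha b hb
        simp only [List.mem_singleton] at hb
        cases hres : res.getLast? with
        | none => rw [List.getLast?_eq_none_iff] at hres; subst hres; simp at ha
        | some m =>
          have h1 : a ≤ m := le_getLast_of_pairwise_lt res m hr hres a ha
          have h2 : m ≤ v := hlast m hres v (by simp)
          have h3 : m ≠ v := by intro h; apply hl; rw [hres, h]
          omega
      have hlast' : ∀ m, (res ++ [v]).getLast? = some m → ∀ b ∈ rest, m ≤ b := by
        intro m hm b hb
        rw [List.getLast?_concat] at hm; injection hm with hm; subst hm
        exact hvle b hb
      simp only [List.foldl_cons, hstep]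
      have := ih (res ++ [v]) hx' hr' hlast'
      refine ⟨this.1, fun x => ?_⟩
      rw [this.2 x]
      simp only [List.mem_append, List.mem_cons]
      tauto

-- ===== VERDICT (by name: the statement is the Claim_ definition above) =====
theorem company_id_accumulator_spec : Claim_equal_company_id_accumulator := by
  intro db_data _
  unfold Spec_company_id_accumulator company_id_accumulator company_id_accumulator_alt
  set flat : List Int :=
    db_data.flatMap (fun d => (d.filter (fun kv => kv.1 == "company_id")).map Prod.snd) with hflat
  have hacc : (db_data.foldl (fun ids d =>
      d.foldl (fun ids kv =>
        if kv.1 == "company_id" && !ids.contains kv.2 then ids ++ [kv.2] else ids) ids) [])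
      = flat.foldl dstep [] := outerA_eq_dstep db_data []
  set acc : List Int := flat.foldl dstep [] with haccdef
  have hA := dstep_fold_spec flat [] (by simp)
  have hxs : (PySem.List.sorted flat (fun x => x) false).Pairwise (· ≤ ·) := by
    have := PySem.List.sorted_pairwise flat (fun x => x) (κ := Int)
    simpa using this
  have hB := adj_fold_spec (PySem.List.sorted flat (fun x => x) false) []
      hxs (by simp) (by simp)
  set adj : List Int := (PySem.List.sorted flat (fun x => x) false).foldl pyAdjStep [] with hadj
  have hAnd : acc.Nodup := hA.1
  have hBnd : adj.Nodup := hB.1.imp (fun h => ne_of_lt h)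
  have hmem : ∀ x, x ∈ adj ↔ x ∈ acc := by
    intro x
    rw [hB.2 x, hA.2 x]
    simp [PySem.List.mem_sorted]
  have hperm : adj.Perm acc := (List.perm_ext_iff_of_nodup hBnd hAnd).mpr hmem
  have hsorted : PySem.List.sorted acc (fun x => x) false = adj :=
    PySem.List.sorted_eq_of_perm_of_pairwise_lt acc adj (fun x => x) hperm (by simpa using hB.1)
  simp only [hacc, hsorted, ← hadj]
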